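-- pv_equiv track=rewrite | github.com/visaplan/plone.ajaxnavigation | src/visaplan/plone/ajaxnavigation/utils.py | embed_view_name
-- ===== SOURCE A (Python) =====
-- def embed_view_name(viewname):
--     """
--     For a given view name <viewname>, construct a name of an "embed view"
--     which is suitable to provide the "naked contents" of the object.
--
--     A final 'view' "word" will be replaced by 'embed':
--
--     >>> embed_view_name('view')
--     'embed'
--     >>> embed_view_name('folder_contents')
--     'folder_contents_embed'
--
--     This hypothetical view name ends with 'view', but this is not a word,
--     so it is ignored:
--     >>> embed_view_name('preview')
--     'preview_embed'
--
--     The divider ('_' preferred) will be preserved: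
--
--     >>> embed_view_name('folder_view')
--     'folder_embed'
--     >>> embed_view_name('folder-view')
--     'folder-embed'
--
--     If the argument is "false" (e.g. an empty string), None is returned:
--     >>> embed_view_name('')
--
--     If no 'view' suffix is found, we consider the divider(s) used.
--     If only dashes are used, we use a dash:
--     >>> embed_view_name('my-images')
--     'my-images-embed'
--
--     If none are found, or both, the underscore is used:
--     >>> embed_view_name('my-cool_images')
--     'my-cool_images_embed'
--     >>> embed_view_name('dontknow')
--     'dontknow_embed'
--     """
--     if viewname == 'view':  # shortcut; doesn't change the result
--         return 'embed'
--     elif not viewname: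
--         return None
--     dividers = ('_', '-')
--     used = []
--     for divider in dividers:
--         liz = viewname.split(divider)
--         if liz[-1] == 'view':
--             return divider.join(liz[:-1] + ['embed'])
--         if liz[1:]:
--             used.append(divider)
--     if used:
--         return used[0].join((viewname, 'embed'))
--     return dividers[0].join((viewname, 'embed'))
-- ===== SOURCE B (Python) =====
-- def embed_view_name(viewname):
--     if not viewname:
--         return None
--     if viewname == 'view':
--         return 'embed'
--     if viewname.endswith('_view'):
--         return viewname[:-5] + '_embed'
--     if viewname.endswith('-view'):
--         return viewname[:-5] + '-embed'
--     divider = '-' if ('-' in viewname and '_' not in viewname) else '_'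
--     return viewname + divider + 'embed'
-- ===== Notes on version B (the rewrite author's own statement) =====
-- stated objective: simpler
-- what changed: Replaces A's loop over dividers that builds split lists and a used-divider accumulator by direct suffix tests on the string with 5-character slicing, plus a membership test that picks the divider; no intermediate lists are built.
import Mathlib
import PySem

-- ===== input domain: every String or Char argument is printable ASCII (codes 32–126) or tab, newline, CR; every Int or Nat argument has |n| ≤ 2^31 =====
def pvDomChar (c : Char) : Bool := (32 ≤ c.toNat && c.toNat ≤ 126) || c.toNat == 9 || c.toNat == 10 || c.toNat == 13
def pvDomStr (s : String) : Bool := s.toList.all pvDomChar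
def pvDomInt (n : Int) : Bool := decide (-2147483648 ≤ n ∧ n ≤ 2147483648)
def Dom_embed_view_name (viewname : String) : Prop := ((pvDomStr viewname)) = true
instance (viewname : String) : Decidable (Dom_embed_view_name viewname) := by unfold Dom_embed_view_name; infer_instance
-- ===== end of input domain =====

-- B tests view-suffixes and divider membership on the string directly instead of A's split-lists loop (simpler; same cost).
-- ===== PORT A =====
-- Loop over the two dividers with the 'used' accumulator; Sum.inl = early return
-- (liz is a split result, hence never empty, so liz[-1] never raises: .getD [] is dead).
def evnLoop (cs : List Char) (divs : List (List Char)) (used : List (List Char)) :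
    (List Char) ⊕ (List (List Char)) :=
  match divs with
  | [] => Sum.inr used
  | divider :: rest =>
    let liz := PySem.Chars.splitOn cs divider
    if (PySem.List.pyGet? liz (-1)).getD [] = "view".toList then
      Sum.inl (PySem.Chars.join divider (PySem.List.slice liz none (some (-1)) ++ ["embed".toList]))
    else if PySem.List.slice liz (some 1) none ≠ [] then
      evnLoop cs rest (used ++ [divider])
    else
      evnLoop cs rest used

def embed_view_name (viewname : String) : Option String :=
  let cs := viewname.toList
  if cs = "view".toList then some "embed"
  else if cs = [] then none
  else
    match evnLoop cs [['_'], ['-']] [] with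
    | Sum.inl r => some (String.ofList r)
    | Sum.inr used =>
      if used ≠ [] then
        some (String.ofList (PySem.Chars.join ((PySem.List.pyGet? used 0).getD []) [cs, "embed".toList]))
      else
        some (String.ofList (PySem.Chars.join ['_'] [cs, "embed".toList]))

-- ===== PORT B =====
def embed_view_name_alt (viewname : String) : Option String :=
  let cs := viewname.toList
  if cs = [] then none
  else if cs = "view".toList then some "embed"
  else if PySem.Chars.endswith cs "_view".toList then
    some (String.ofList (PySem.List.slice cs none (some (-5)) ++ "_embed".toList))
  else if PySem.Chars.endswith cs "-view".toList then
    some (String.ofList (PySem.List.slice cs none (some (-5)) ++ "-embed".toList))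
  else
    let divider : Char :=
      if PySem.Chars.isIn ['-'] cs && !(PySem.Chars.isIn ['_'] cs) then '-' else '_'
    some (String.ofList (cs ++ divider :: "embed".toList))

-- ===== PRECONDITION & SPEC =====
def Spec_embed_view_name (viewname : String) (out : Option String) : Prop := out = embed_view_name_alt viewname
instance (viewname : String) (out : Option String) : Decidable (Spec_embed_view_name viewname out) := by unfold Spec_embed_view_name; infer_instance

-- ===== CLAIM (what is proved, stated in full; the proofs are below) =====
def Claim_equal_embed_view_name : Prop := ∀ (viewname : String), Dom_embed_view_name viewname → Spec_embed_view_name viewname (embed_view_name viewname)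

-- ===== LEMMAS AND PROOFS =====

theorem modifyHead_nil_append {α : Type} (l : List (List α)) :
    l.modifyHead (fun x => [] ++ x) = l := by cases l <;> simp

theorem evn_go_spec (d : Char) (fuel : Nat) (l cur : List Char) (acc : List (List Char))
    (h : l.length < fuel) :
    PySem.Chars.splitOn.go [d] fuel l cur acc
      = acc.reverse ++ (l.splitOn d).modifyHead (fun x => cur.reverse ++ x) := by
  induction fuel generalizing l cur acc with
  | zero => omega
  | succ n ih =>
    cases l with
    | nil => simp [PySem.Chars.splitOn.go, List.splitOn]
    | cons c rest =>
      rw [PySem.Chars.splitOn.go]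
      by_cases hc : c = d
      · subst hc
        simp only [List.isPrefixOf, beq_self_eq_true, Bool.true_and, List.isPrefixOf_nil_left,
          if_true, List.length_cons, List.drop_succ_cons, List.drop_zero]
        rw [ih _ _ _ (by simpa using Nat.lt_of_succ_lt_succ h)]
        simp only [List.splitOn, List.splitOnP_cons, beq_self_eq_true, if_true,
          List.modifyHead_cons, List.reverse_cons, List.append_assoc, List.singleton_append,
          List.nil_append, List.reverse_nil]
        cases h' : List.splitOnP (fun x => x == c) rest <;> simp [h']
      · have : [d].isPrefixOf (c :: rest) = false := by
          simp [List.isPrefixOf]; exact fun hdc => (hc hdc.symm).elim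
        rw [if_neg (by simp [this])]
        rw [ih _ _ _ (by simpa using Nat.lt_of_succ_lt_succ h)]
        simp only [List.splitOn, List.splitOnP_cons, beq_iff_eq, if_neg hc,
          List.modifyHead_modifyHead]
        cases List.splitOnP (fun x => x == d) rest <;> simp

theorem chars_splitOn_eq (cs : List Char) (d : Char) :
    PySem.Chars.splitOn cs [d] = cs.splitOn d := by
  rw [PySem.Chars.splitOn, evn_go_spec d _ cs [] [] (by omega)]
  simpa using modifyHead_nil_append (cs.splitOn d)

theorem splitOn_no_occ {cs : List Char} {d : Char} (h : d ∉ cs) : cs.splitOn d = [cs] :=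
  List.splitOnP_eq_single _ _ (by intro x hx; simp; exact fun he => h (he ▸ hx))

theorem splitOn_last {pre post : List Char} {d : Char} (h : d ∉ post) :
    (pre ++ d :: post).splitOn d = pre.splitOn d ++ [post] := by
  rw [List.splitOn, List.splitOnP_append_cons _ _ _ d (by simp)]
  rw [← List.splitOn, ← List.splitOn, splitOn_no_occ h]

theorem last_occ_decomp {cs : List Char} {d : Char} (h : d ∈ cs) :
    ∃ pre post, cs = pre ++ d :: post ∧ d ∉ post := by
  induction cs with
  | nil => cases h
  | cons c rest ih =>
    by_cases hr : d ∈ rest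
    · obtain ⟨pre, post, h1, h2⟩ := ih hr
      exact ⟨c :: pre, post, by simp [h1], h2⟩
    · have hc : c = d := by
        rcases List.mem_cons.mp h with h' | h'
        · exact h'.symm
        · exact absurd h' hr
      exact ⟨[], rest, by simp [hc], hr⟩

theorem suffix_iff_post {pre post v : List Char} {d : Char} (hpost : d ∉ post) (hv : d ∉ v) :
    ((d :: v) <:+ (pre ++ d :: post)) ↔ post = v := by
  constructor
  · intro hsuf
    have h2 : (d :: post) <:+ (pre ++ d :: post) := ⟨pre, rfl⟩
    rcases List.suffix_or_suffix_of_suffix hsuf h2 with h | h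
    · obtain ⟨u, hu⟩ := h
      cases u with
      | nil => simpa using hu.symm
      | cons a u' =>
        exfalso
        have : post = u' ++ d :: v := by simpa using congrArg List.tail hu.symm
        exact hpost (by simp [this])
    · obtain ⟨u, hu⟩ := h
      cases u with
      | nil => simpa using hu
      | cons a u' =>
        exfalso
        have : v = u' ++ d :: post := by simpa using congrArg List.tail hu.symm
        exact hv (by simp [this])
  · rintro rfl; exact ⟨pre, rfl⟩

theorem not_suffix_of_not_mem {cs v : List Char} {d : Char} (h : d ∉ cs) :
    ¬ ((d :: v) <:+ cs) := fun hs => h (hs.subset (by simp))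

theorem intercalate_append_singleton {d : Char} {xs : List (List Char)} (y : List Char)
    (h : xs ≠ []) : [d].intercalate (xs ++ [y]) = [d].intercalate xs ++ d :: y := by
  induction xs with
  | nil => simp at h
  | cons a xs ih =>
    cases xs with
    | nil => simp [List.intercalate]
    | cons b xs =>
      have hstep : ∀ (rest : List (List Char)),
          [d].intercalate (a :: b :: rest) = a ++ d :: [d].intercalate (b :: rest) := by
        intro rest
        simp [List.intercalate]
      simp only [List.cons_append]
      rw [hstep]
      have := ih (by simp)
      simp only [List.cons_append] at this
      rw [this, hstep]
      simp

theorem join_pair (d : Char) (a b : List Char) :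
    PySem.Chars.join [d] [a, b] = a ++ d :: b := by
  simp [PySem.Chars.join, List.intercalate]

theorem isIn_singleton (c : Char) (cs : List Char) :
    PySem.Chars.isIn [c] cs = true ↔ c ∈ cs := by
  rw [PySem.Chars.isIn_iff_infix]
  exact ⟨fun h => h.subset (by simp), fun h => (List.singleton_infix_iff c cs).mpr h⟩

theorem lizLast_iff (d : Char) (cs : List Char) (hv : cs ≠ "view".toList)
    (hd : d ∉ "view".toList) :
    (((PySem.List.pyGet? (PySem.Chars.splitOn cs [d]) (-1)).getD []) = "view".toList)
      ↔ (d :: "view".toList) <:+ cs := by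
  rw [chars_splitOn_eq]
  by_cases hmem : d ∈ cs
  · obtain ⟨pre, post, rfl, hpost⟩ := last_occ_decomp hmem
    rw [splitOn_last hpost, PySem.List.pyGet?_neg_one, List.getLast?_concat]
    rw [Option.getD_some, suffix_iff_post hpost hd]
  · rw [splitOn_no_occ hmem, PySem.List.pyGet?_neg_one]
    simp only [List.getLast?_singleton, Option.getD_some]
    exact iff_of_false hv (not_suffix_of_not_mem hmem)

theorem lizTail_iff (d : Char) (cs : List Char) :
    (PySem.List.slice (PySem.Chars.splitOn cs [d]) (some 1) none ≠ []) ↔ d ∈ cs := by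
  rw [chars_splitOn_eq, PySem.List.slice_from_one]
  by_cases hmem : d ∈ cs
  · refine iff_of_true ?_ hmem
    obtain ⟨pre, post, h, hpost⟩ := last_occ_decomp hmem
    rw [h, splitOn_last hpost]
    obtain ⟨x, xs, hx⟩ := List.exists_cons_of_ne_nil (List.splitOnP_ne_nil _ pre)
    rw [List.splitOn, hx]
    simp
  · rw [splitOn_no_occ hmem]
    simp [hmem]

theorem sliceB_eq (cs : List Char) :
    PySem.List.slice cs none (some (-5)) = cs.take (cs.length - 5) := by
  have h := PySem.List.slice_to_neg_natCast (xs := cs) (k := 5) (by norm_num)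
  simpa using h

theorem lizJoin_eq (d : Char) (cs : List Char) (hd : d ∉ "view".toList)
    (hsuf : (d :: "view".toList) <:+ cs) :
    PySem.Chars.join [d]
        (PySem.List.slice (PySem.Chars.splitOn cs [d]) none (some (-1)) ++ ["embed".toList])
      = cs.take (cs.length - 5) ++ d :: "embed".toList := by
  have hmem : d ∈ cs := hsuf.subset (by simp)
  obtain ⟨pre, post, rfl, hpost⟩ := last_occ_decomp hmem
  have hpv : post = "view".toList := (suffix_iff_post hpost hd).mp hsuf
  subst hpv
  rw [chars_splitOn_eq, splitOn_last hpost, PySem.List.slice_to_neg_one, List.dropLast_concat]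
  show [d].intercalate (pre.splitOn d ++ ["embed".toList]) = _
  rw [intercalate_append_singleton _ (by rw [List.splitOn]; exact List.splitOnP_ne_nil _ pre),
    List.intercalate_splitOn]
  have hlen : (pre ++ d :: "view".toList).length - 5 = pre.length := by simp
  rw [hlen, List.take_left]

-- ===== VERDICT (by name: the statement is the Claim_ definition above) =====

theorem embed_view_name_spec : Claim_equal_embed_view_name := by
  intro viewname _
  unfold Spec_embed_view_name embed_view_name embed_view_name_alt
  by_cases hv : viewname.toList = "view".toList
  · simp [hv]
  by_cases h0 : viewname.toList = []
  · simp [h0]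
  rw [if_neg hv, if_neg h0, if_neg h0, if_neg hv]
  set cs := viewname.toList with hcs
  have hUd : '_' ∉ "view".toList := by decide
  have hMd : '-' ∉ "view".toList := by decide
  have hUv : "_view".toList = '_' :: "view".toList := by decide
  have hMv : "-view".toList = '-' :: "view".toList := by decide
  have hUe : "_embed".toList = '_' :: "embed".toList := by decide
  have hMe : "-embed".toList = '-' :: "embed".toList := by decide
  by_cases hU : ('_' :: "view".toList) <:+ cs
  · have hA := (lizLast_iff '_' cs hv hUd).mpr hU
    have hBe : PySem.Chars.endswith cs "_view".toList = true := by
      rw [PySem.Chars.endswith_iff, hUv]; exact hU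
    simp only [evnLoop, hA, if_true, hBe]
    rw [lizJoin_eq '_' cs hUd hU, sliceB_eq, hUe]
  · have hA : ¬ ((PySem.List.pyGet? (PySem.Chars.splitOn cs ['_']) (-1)).getD [] = "view".toList) :=
      fun h => hU ((lizLast_iff '_' cs hv hUd).mp h)
    have hBe : PySem.Chars.endswith cs "_view".toList = false := by
      rw [Bool.eq_false_iff, Ne, PySem.Chars.endswith_iff, hUv]; exact hU
    by_cases hM : ('-' :: "view".toList) <:+ cs
    · have hA2 := (lizLast_iff '-' cs hv hMd).mpr hM
      have hBe2 : PySem.Chars.endswith cs "-view".toList = true := by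
        rw [PySem.Chars.endswith_iff, hMv]; exact hM
      simp only [evnLoop, hA, if_false, hBe, hBe2]
      by_cases hUm : '_' ∈ cs
      · rw [if_pos ((lizTail_iff '_' cs).mpr hUm)]
        simp only [evnLoop, hA2, if_true, hBe2]
        rw [lizJoin_eq '-' cs hMd hM, sliceB_eq, hMe]
        simp
      · rw [if_neg (fun h => hUm ((lizTail_iff '_' cs).mp h))]
        simp only [evnLoop, hA2, if_true, hBe2]
        rw [lizJoin_eq '-' cs hMd hM, sliceB_eq, hMe]
        simp
    · have hA2 : ¬ ((PySem.List.pyGet? (PySem.Chars.splitOn cs ['-']) (-1)).getD [] = "view".toList) :=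
        fun h => hM ((lizLast_iff '-' cs hv hMd).mp h)
      have hBe2 : PySem.Chars.endswith cs "-view".toList = false := by
        rw [Bool.eq_false_iff, Ne, PySem.Chars.endswith_iff, hMv]; exact hM
      simp only [evnLoop, if_neg hA, if_neg hA2, hBe, hBe2]
      by_cases hUm : '_' ∈ cs
      · rw [if_pos ((lizTail_iff '_' cs).mpr hUm)]
        have hIn : PySem.Chars.isIn ['_'] cs = true := (isIn_singleton '_' cs).mpr hUm
        by_cases hMm : '-' ∈ cs
        · rw [if_pos ((lizTail_iff '-' cs).mpr hMm)]
          simp [join_pair, hIn]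
        · rw [if_neg (fun h => hMm ((lizTail_iff '-' cs).mp h))]
          have hIn2 : PySem.Chars.isIn ['-'] cs = false := by
            rw [Bool.eq_false_iff, Ne, isIn_singleton]; exact hMm
          simp [join_pair, hIn, hIn2]
      · rw [if_neg (fun h => hUm ((lizTail_iff '_' cs).mp h))]
        have hIn : PySem.Chars.isIn ['_'] cs = false := by
          rw [Bool.eq_false_iff, Ne, isIn_singleton]; exact hUm
        by_cases hMm : '-' ∈ cs
        · rw [if_pos ((lizTail_iff '-' cs).mpr hMm)]
          have hIn2 : PySem.Chars.isIn ['-'] cs = true := (isIn_singleton '-' cs).mpr hMm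
          simp [join_pair, hIn, hIn2]
        · rw [if_neg (fun h => hMm ((lizTail_iff '-' cs).mp h))]
          have hIn2 : PySem.Chars.isIn ['-'] cs = false := by
            rw [Bool.eq_false_iff, Ne, isIn_singleton]; exact hMm
          simp [join_pair, hIn, hIn2]
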